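-- pv_equiv track=rewrite | github.com/sskeysskey/Financial_System | Query/Analyse_Combined.py | parse_output_generic
-- ===== SOURCE A (Python) =====
-- def parse_output_generic(output):
--     """解析 output 文本，提取 {category: [symbols]}"""
--     updates = {}
--     lines = output.split('\n')
--     for line in lines:
--         if line.strip():
--             parts = line.split()
--             if len(parts) >= 2:
--                 category = parts[0]
--                 symbol = parts[1]
--                 if category in updates:
--                     updates[category].append(symbol)
--                 else:
--                     updates[category] = [symbol]
--     return updates
-- ===== SOURCE B (Python) =====
-- def parse_output_generic(output):
--     """解析 output 文本，提取 {category: [symbols]}"""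
--     # Pass 1: flatten the text into (category, symbol) pairs.
--     pairs = [(p[0], p[1])
--              for p in (line.split() for line in output.split('\n') if line.strip())
--              if len(p) >= 2]
--     # Pass 2: at each category's first occurrence, grab its whole symbol group by filtering.
--     result = {}
--     for cat, _ in pairs:
--         if cat not in result:
--             result[cat] = [s for c, s in pairs if c == cat]
--     return result
-- ===== Notes on version B (the rewrite author's own statement) =====
-- stated objective: alternative
-- what changed: A accumulates symbols into a dict on the fly, appending per line; B first flattens the text into a list of (category, symbol) pairs in one pass and then builds each dict entry wholesale at the category's first occurrence by filtering the flat pair list.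
import Mathlib
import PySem

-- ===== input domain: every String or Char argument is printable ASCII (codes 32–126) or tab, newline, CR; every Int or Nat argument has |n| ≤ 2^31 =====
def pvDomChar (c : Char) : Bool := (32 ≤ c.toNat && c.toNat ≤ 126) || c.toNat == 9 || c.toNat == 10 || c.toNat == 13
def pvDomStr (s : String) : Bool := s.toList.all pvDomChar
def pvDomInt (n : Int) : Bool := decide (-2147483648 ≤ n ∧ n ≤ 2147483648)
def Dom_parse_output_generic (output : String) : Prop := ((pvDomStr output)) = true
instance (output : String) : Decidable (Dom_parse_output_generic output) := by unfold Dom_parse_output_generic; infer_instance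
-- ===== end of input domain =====

-- B replaces A's on-the-fly dict accumulation with a flatten-to-(category,symbol)-pairs pass
-- followed by filter-based grouping at each category's first occurrence (alternative decomposition).


-- ===== PORT A =====
-- s.split('\n'): sep is the nonempty literal "\n", so Python never raises; split? is `some` there.
def pySplitNL (s : String) : List String := (PySem.Str.split? s "\n").getD []

def parse_output_generic (output : String) : List (String × List String) :=
  let lines := pySplitNL output
  (lines.foldl (fun (updates : PySem.Dict String (List String)) line =>
      if PySem.Str.strip line ≠ "" then
        let parts := PySem.Str.split₀ line
        if 2 ≤ parts.length then
          let category := PySem.List.pyGetD parts 0 ""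
          let symbol := PySem.List.pyGetD parts 1 ""
          if updates.contains category then
            updates.modify category [] (fun v => v ++ [symbol])
          else
            updates.insert category [symbol]
        else updates
      else updates) PySem.Dict.empty).items

-- ===== PORT B =====
def parse_output_generic_alt (output : String) : List (String × List String) :=
  let pairs :=
    ((((pySplitNL output).filter
          (fun line => decide (PySem.Str.strip line ≠ ""))).map
        PySem.Str.split₀).filter
      (fun p => decide (2 ≤ p.length))).map
      (fun p => (PySem.List.pyGetD p 0 "", PySem.List.pyGetD p 1 ""))
  (pairs.foldl (fun (result : PySem.Dict String (List String)) pr =>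
      if result.contains pr.1 then result
      else result.insert pr.1 ((pairs.filter (fun q => q.1 == pr.1)).map (fun q => q.2)))
    PySem.Dict.empty).items

-- ===== PRECONDITION & SPEC =====
def Spec_parse_output_generic (output : String) (out : List (String × List String)) : Prop := out = parse_output_generic_alt output
instance (output : String) (out : List (String × List String)) : Decidable (Spec_parse_output_generic output out) := by unfold Spec_parse_output_generic; infer_instance

-- ===== CLAIM (what is proved, stated in full; the proofs are below) =====
def Claim_equal_parse_output_generic : Prop := ∀ (output : String), Dom_parse_output_generic output → Spec_parse_output_generic output (parse_output_generic output)

-- ===== LEMMAS AND PROOFS =====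

-- the flat (category, symbol) pair list B builds, and the common normal form both folds reach:
-- categories in first-occurrence order, each paired with its full symbol group
def pvPairs (output : String) : List (String × String) :=
  ((((pySplitNL output).filter
        (fun line => decide (PySem.Str.strip line ≠ ""))).map
      PySem.Str.split₀).filter
    (fun p => decide (2 ≤ p.length))).map
    (fun p => (PySem.List.pyGetD p 0 "", PySem.List.pyGetD p 1 ""))

def pvSpecItems (ps : List (String × String)) : List (String × List String) :=
  (PySem.Set.ofList (ps.map Prod.fst)).map
    (fun c => (c, (ps.filter (fun q => q.1 == c)).map (fun q => q.2)))

lemma pvStepA (d : PySem.Dict String (List String)) (line : String) :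
    (if PySem.Str.strip line ≠ "" then
        if 2 ≤ (PySem.Str.split₀ line).length then
          if d.contains (PySem.List.pyGetD (PySem.Str.split₀ line) 0 "") then
            d.modify (PySem.List.pyGetD (PySem.Str.split₀ line) 0 "") []
              (fun v => v ++ [PySem.List.pyGetD (PySem.Str.split₀ line) 1 ""])
          else
            d.insert (PySem.List.pyGetD (PySem.Str.split₀ line) 0 "")
              [PySem.List.pyGetD (PySem.Str.split₀ line) 1 ""]
        else d
      else d)
    = if PySem.Str.strip line ≠ "" ∧ 2 ≤ (PySem.Str.split₀ line).length then
        d.modify (PySem.List.pyGetD (PySem.Str.split₀ line) 0 "") []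
          (fun v => v ++ [PySem.List.pyGetD (PySem.Str.split₀ line) 1 ""])
      else d := by
  by_cases h1 : PySem.Str.strip line ≠ ""
  · by_cases h2 : 2 ≤ (PySem.Str.split₀ line).length
    · simp only [h1, h2, and_self, if_true, ite_true, not_true]
      by_cases hc : d.contains (PySem.List.pyGetD (PySem.Str.split₀ line) 0 "") = true
      · simp [hc]
      · rw [Bool.not_eq_true] at hc
        simp [hc, PySem.Dict.modify, PySem.Dict.getD_of_not_contains, hc]
    · simp [h1, h2]
  · simp [h1]

lemma pvA_foldl (lines : List String) (d : PySem.Dict String (List String)) :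
    lines.foldl (fun (updates : PySem.Dict String (List String)) line =>
      if PySem.Str.strip line ≠ "" then
        if 2 ≤ (PySem.Str.split₀ line).length then
          if updates.contains (PySem.List.pyGetD (PySem.Str.split₀ line) 0 "") then
            updates.modify (PySem.List.pyGetD (PySem.Str.split₀ line) 0 "") []
              (fun v => v ++ [PySem.List.pyGetD (PySem.Str.split₀ line) 1 ""])
          else
            updates.insert (PySem.List.pyGetD (PySem.Str.split₀ line) 0 "")
              [PySem.List.pyGetD (PySem.Str.split₀ line) 1 ""]
        else updates
      else updates) d
    = ((lines.filter (fun l => decide (PySem.Str.strip l ≠ "" ∧ 2 ≤ (PySem.Str.split₀ l).length))).map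
        (fun l => ((PySem.List.pyGetD (PySem.Str.split₀ l) 0 "" : String),
                   (PySem.List.pyGetD (PySem.Str.split₀ l) 1 "" : String)))).foldl
        (fun d p => d.modify p.1 [] (fun v => v ++ [p.2])) d := by
  simp only [List.foldl_map]
  rw [← PySem.List.foldl_ite_eq_foldl_filter
      (p := fun l => PySem.Str.strip l ≠ "" ∧ 2 ≤ (PySem.Str.split₀ l).length)
      (f := fun (d : PySem.Dict String (List String)) l =>
        d.modify (PySem.List.pyGetD (PySem.Str.split₀ l) 0 "") []
          (fun v => v ++ [PySem.List.pyGetD (PySem.Str.split₀ l) 1 ""]))]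
  apply PySem.List.foldl_congr_mem
  intro acc x _
  exact pvStepA acc x

lemma pvExtract_eq (lines : List String) :
    ((((lines.filter (fun line => decide (PySem.Str.strip line ≠ ""))).map
        PySem.Str.split₀).filter (fun p => decide (2 ≤ p.length))).map
      (fun p => ((PySem.List.pyGetD p 0 "" : String), (PySem.List.pyGetD p 1 "" : String))))
    = (lines.filter (fun l => decide (PySem.Str.strip l ≠ "" ∧ 2 ≤ (PySem.Str.split₀ l).length))).map
        (fun l => ((PySem.List.pyGetD (PySem.Str.split₀ l) 0 "" : String),
                   (PySem.List.pyGetD (PySem.Str.split₀ l) 1 "" : String))) := by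
  rw [List.filter_map, List.map_map, List.filter_filter]
  have hfil : (lines.filter (fun a =>
        ((fun p => decide (2 ≤ p.length)) ∘ PySem.Str.split₀) a
          && (fun line => decide (PySem.Str.strip line ≠ "")) a))
      = lines.filter (fun l => decide (PySem.Str.strip l ≠ "" ∧ 2 ≤ (PySem.Str.split₀ l).length)) := by
    apply List.filter_congr
    intro a _
    simp [Function.comp, Bool.and_comm]
  rw [hfil]
  rfl

lemma pvModFold_items (ps : List (String × String)) :
    (ps.foldl (fun (d : PySem.Dict String (List String)) p =>
        d.modify p.1 [] (fun v => v ++ [p.2])) PySem.Dict.empty).items = pvSpecItems ps := by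
  have hnd : (ps.foldl (fun (d : PySem.Dict String (List String)) p =>
      d.modify p.1 [] (fun v => v ++ [p.2])) PySem.Dict.empty).keys.Nodup :=
    PySem.Dict.nodup_keys_foldl_modify_key ps Prod.fst [] (fun d p => fun v => v ++ [p.2])
      PySem.Dict.empty (by simp)
  rw [PySem.Dict.items_eq_map_keys _ hnd []]
  rw [PySem.Dict.keys_foldl_modify_key ps Prod.fst [] (fun d p => fun v => v ++ [p.2])]
  unfold pvSpecItems
  have hk : PySem.Set.update (PySem.Dict.empty : PySem.Dict String (List String)).keys (ps.map Prod.fst)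
      = PySem.Set.ofList (ps.map Prod.fst) := by
    simp [PySem.Set.update_nil_left]
  rw [hk]
  apply List.map_congr_left
  intro c hc
  rw [PySem.Dict.getD_foldl_modify_append]
  simp

lemma pvFilterDiscard {c : String} (pb : String → Bool) (hb : pb c = false) (X : List String) :
    (List.filter (fun y => !(y == c)) X).filter pb = X.filter pb := by
  rw [List.filter_filter]
  apply List.filter_congr
  intro y hy
  by_cases hyc : y = c
  · subst hyc; simp [hb]
  · simp [hyc]

lemma pvBfold (full : List (String × String)) (ps : List (String × String)) :
    ∀ (d : PySem.Dict String (List String)),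
    (ps.foldl (fun d pr =>
        if d.contains pr.1 then d
        else d.insert pr.1 ((full.filter (fun q => q.1 == pr.1)).map (fun q => q.2))) d).items
    = d.items ++ ((PySem.Set.ofList (ps.map Prod.fst)).filter
        (fun c => !(d.contains c))).map
        (fun c => (c, (full.filter (fun q => q.1 == c)).map (fun q => q.2))) := by
  induction ps with
  | nil => intro d; simp [PySem.Set.ofList_nil]
  | cons pr rest ih =>
    intro d
    simp only [List.foldl_cons, List.map_cons]
    rw [PySem.Set.ofList_cons]
    by_cases h : d.contains pr.1 = true
    · rw [if_pos h, ih d]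
      congr 1
      rw [List.filter_cons, if_neg (by simp [h])]
      simp only [PySem.Set.discard]
      rw [pvFilterDiscard _ (by simp [h])]
    · rw [Bool.not_eq_true] at h
      rw [if_neg (by simp [h]), ih]
      rw [PySem.Dict.items_insert_of_not_contains d _ h]
      rw [List.filter_cons, if_pos (by simp [h])]
      have hfil : (PySem.Set.ofList (rest.map Prod.fst)).filter
            (fun y => !((d.insert pr.1 ((full.filter (fun q => q.1 == pr.1)).map (fun q => q.2))).contains y))
          = ((PySem.Set.ofList (rest.map Prod.fst)).filter (fun y => !(y == pr.1))).filter
            (fun c => !(d.contains c)) := by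
        rw [List.filter_filter]
        apply List.filter_congr
        intro y hy
        rw [PySem.Dict.contains_insert]
        cases hy2 : (y == pr.1) <;> simp [hy2]
      rw [hfil]
      simp only [PySem.Set.discard, List.map_cons]
      simp [List.filter_filter]

lemma pvB_eq_spec (output : String) :
    parse_output_generic_alt output = pvSpecItems (pvPairs output) := by
  simp only [parse_output_generic_alt]
  rw [pvBfold]
  have ht : ∀ (X : List String), X.filter (fun _ => true) = X := by
    intro X; induction X with
    | nil => rfl
    | cons a l ihl => simp [List.filter_cons, ihl]
  simp [pvSpecItems, pvPairs, PySem.Dict.contains_empty, PySem.Dict.empty, ht]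

lemma pvA_eq_spec (output : String) :
    parse_output_generic output = pvSpecItems (pvPairs output) := by
  simp only [parse_output_generic]
  rw [pvA_foldl, ← pvExtract_eq, pvModFold_items]
  rfl

-- ===== VERDICT (by name: the statement is the Claim_ definition above) =====
theorem parse_output_generic_spec : Claim_equal_parse_output_generic := by
  intro output _
  unfold Spec_parse_output_generic
  rw [pvA_eq_spec, pvB_eq_spec]
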